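-- pv_equiv track=rewrite | github.com/tjdgus3160/algorithm | 프로그래머스/Level2/영어 끝말잇기.py | solution
-- ===== SOURCE A (Python) =====
-- def solution(n, words):
--     dic={}
--     res=[0,0]
--     turn=1
--     last=''
--     cnt=1
--     for i in words:
--         if cnt>n:
--             turn+=1
--             cnt=1
--         if last=='':
--             last=i[-1]
--             dic[i]=1
--             cnt+=1
--             continue
--         if i in dic:
--             return [cnt, turn]
--         if last == i[0]:
--             last = i[-1]
--             cnt+=1
--             dic[i] = 1
--         else:
--             return [cnt,turn]
--     return res
-- ===== SOURCE B (Python) =====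
-- def solution(n, words):
--     total = len(words)
--     # pass 1: first index whose word already occurred earlier
--     first = {}
--     dup = total
--     for i, w in enumerate(words):
--         if w in first:
--             dup = i
--             break
--         first[w] = i
--     # pass 2: first position whose word does not chain onto the previous word;
--     # positions past the first duplicate cannot matter, so only dup pairs are scanned
--     brk = next((i for i, (a, b) in enumerate(zip(words[:dup], words[1:dup + 1]), 1)
--                 if a[-1] != b[0]), total)
--     k = min(dup, brk)
--     return [0, 0] if k == total else [k % n + 1, k // n + 1]
-- ===== Notes on version B (the rewrite author's own statement) =====
-- stated objective: alternative
-- what changed: A's single stateful pass (dict, last-letter, turn/cnt counters with reset-and-carry and early return) is replaced by two independent staged scans - first duplicate index and first chain-break index (scanned only up to the duplicate) - combined with min, with the answer derived in closed form from that index.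
-- intended difference: For n < 0 with at least two words, A returns [1, k+2] at the first failing index k (its cnt/turn counters reset on every word once n <= 0), while B returns the uniform closed form [k % n + 1, k // n + 1]; a negative player count is outside the game's meaning and B's uniform formula is the intended behaviour on that corner. — e.g. on solution(-1, ["ab", "xx"]): A returns [1, 3], B returns [1, 0]
-- outside the precondition, e.g. on solution(0, ['ab', 'bb', 'x']): A returns [1, 4], B raises ZeroDivisionError
import Mathlib
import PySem

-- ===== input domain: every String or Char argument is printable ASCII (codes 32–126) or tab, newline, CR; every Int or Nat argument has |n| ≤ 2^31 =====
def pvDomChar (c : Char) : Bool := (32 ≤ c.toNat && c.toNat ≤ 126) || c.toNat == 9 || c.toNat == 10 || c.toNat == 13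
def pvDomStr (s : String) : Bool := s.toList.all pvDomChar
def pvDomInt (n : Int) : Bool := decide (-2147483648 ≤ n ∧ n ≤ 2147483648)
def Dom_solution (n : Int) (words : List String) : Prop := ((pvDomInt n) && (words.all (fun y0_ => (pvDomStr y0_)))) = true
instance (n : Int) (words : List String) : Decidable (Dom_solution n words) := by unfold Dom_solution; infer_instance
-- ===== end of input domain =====

-- B replaces A's single stateful pass (dict, last letter, turn/cnt reset-and-carry counters,
-- early return) by two independent staged scans — first-duplicate index and first-chain-break
-- index — combined with min, with the answer derived in closed form from that index.

-- shared helper: a Python 1-character string s[i] as a List Char ([] only when out of range, excluded by Pre_)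
def charAt (s : String) (i : Int) : List Char :=
  (PySem.List.pyGet? s.toList i).elim [] (fun c => [c])

-- ===== PORT A =====
def solutionGo (n : Int) (ws : List String) (dic : PySem.Dict String Int)
    (turn cnt : Int) (last : List Char) : List Int :=
  match ws with
  | [] => [0, 0]                                   -- res
  | i :: rest =>
    let tc := if cnt > n then (turn + 1, (1 : Int)) else (turn, cnt)
    let turn := tc.1
    let cnt := tc.2
    if last = [] then
      solutionGo n rest (dic.insert i 1) turn (cnt + 1) (charAt i (-1))
    else if dic.contains i = true then [cnt, turn]
    else if last = charAt i 0 then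
      solutionGo n rest (dic.insert i 1) turn (cnt + 1) (charAt i (-1))
    else [cnt, turn]

def solution (n : Int) (words : List String) : List Int :=
  solutionGo n words PySem.Dict.empty 1 1 []

-- ===== PORT B =====
-- pass 1 of Source B: first index whose word already occurred earlier (total if none)
def dupScan (ws : List String) (i : Int) (first : PySem.Dict String Int) (total : Int) : Int :=
  match ws with
  | [] => total
  | w :: rest => if first.contains w then i else dupScan rest (i + 1) (first.insert w i) total

-- pass 2 of Source B: first 1-based position whose pair does not chain (only dup pairs are scanned)
def brkScan (ps : List (String × String)) (i total : Int) : Int :=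
  match ps with
  | [] => total
  | (a, b) :: rest => if charAt a (-1) ≠ charAt b 0 then i else brkScan rest (i + 1) total

def solution_alt (n : Int) (words : List String) : List Int :=
  let total : Int := words.length
  let dup := dupScan words 0 PySem.Dict.empty total
  let brk := brkScan ((PySem.List.slice words (some 0) (some dup)).zip
                      (PySem.List.slice words (some 1) (some (dup + 1)))) 1 total
  let k := min dup brk
  if k = total then [0, 0] else [PySem.Int.mod k n + 1, PySem.Int.floordiv k n + 1]

-- ===== PRECONDITION & SPEC =====
-- Pre_ excludes n = 0 (B's closed form k % n raises ZeroDivisionError there) and lists in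
-- which some empty word is not preceded by an earlier rule violation (duplicate or chain
-- break): on exactly those lists A reaches the empty word and raises IndexError.
def Pre_solution (n : Int) (words : List String) : Prop :=
  n ≠ 0 ∧ ∀ j : Nat, j < words.length → words.getD j "x" = "" →
    ∃ i : Nat, i < j ∧ 1 ≤ i ∧
      (words.getD i "" ∈ words.take i ∨
       charAt (words.getD (i - 1) "") (-1) ≠ charAt (words.getD i "") 0)
instance (n : Int) (words : List String) : Decidable (Pre_solution n words) := by
  unfold Pre_solution; infer_instance

def pvWitness_solution : Int × List String := (2, ["ab", "bc", "ca"])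

-- For n < 0 with at least two words, at the first failing index k A returns [1, k + 2]
-- (its cnt/turn counters reset on every word once n ≤ 0), while B returns the uniform
-- closed-form numbering [k % n + 1, k // n + 1]; a negative player count is outside the
-- game's meaning and B's uniform formula is the intended behaviour on that corner.
def D_solution (n : Int) (words : List String) : Prop :=
  n < 0 ∧ 2 ≤ words.length
instance (n : Int) (words : List String) : Decidable (D_solution n words) := by
  unfold D_solution; infer_instance

def Spec_solution (n : Int) (words : List String) (out : List Int) : Prop := ¬ D_solution n words → out = solution_alt n words
instance (n : Int) (words : List String) (out : List Int) : Decidable (Spec_solution n words out) := by unfold Spec_solution; infer_instance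

def pvDiffWitness_solution : Int × List String := (-1, ["ab", "xx"])
def pvDiffWitnessOut_solution : (List Int) × (List Int) := ([1, 3], [1, 0])

-- ===== CLAIM (what is proved, stated in full; the proofs are below) =====
def Claim_unchanged_solution : Prop := ∀ (n : Int) (words : List String), Dom_solution n words → Pre_solution n words → Spec_solution n words (solution n words)
def Claim_changed_solution : Prop := Dom_solution (pvDiffWitness_solution.1) (pvDiffWitness_solution.2) ∧ Pre_solution (pvDiffWitness_solution.1) (pvDiffWitness_solution.2) ∧ D_solution (pvDiffWitness_solution.1) (pvDiffWitness_solution.2) ∧ solution (pvDiffWitness_solution.1) (pvDiffWitness_solution.2) = pvDiffWitnessOut_solution.1 ∧ solution_alt (pvDiffWitness_solution.1) (pvDiffWitness_solution.2) = pvDiffWitnessOut_solution.2 ∧ pvDiffWitnessOut_solution.1 ≠ pvDiffWitnessOut_solution.2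

-- ===== LEMMAS AND PROOFS =====

-- proof-only intermediate: the single pass with index, seen-set and previous last letter
def onePass (n : Int) (ws : List String) (idx : Int)
    (seen : PySem.Set String) (prev : List Char) : List Int :=
  match ws with
  | [] => [0, 0]
  | w :: rest =>
    if 0 < idx ∧ (PySem.Set.contains seen w = true ∨ charAt w 0 ≠ prev) then
      [PySem.Int.mod idx n + 1, PySem.Int.floordiv idx n + 1]
    else
      onePass n rest (idx + 1) (PySem.Set.add seen w) (charAt w (-1))

lemma charAt_last_ne_nil (s : String) (hs : s ≠ "") : charAt s (-1) ≠ [] := by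
  have h : s.toList ≠ [] := by
    intro h
    apply hs
    have := congrArg String.ofList h
    simpa using this
  unfold charAt
  rcases List.getLast?_eq_getLast_of_ne_nil h with hl
  rw [PySem.List.pyGet?_neg_one, hl]
  simp

lemma mod_fdiv_decomp (n q r : Int) (hn : 1 ≤ n) (hr0 : 0 ≤ r) (hr : r < n) :
    PySem.Int.mod (n * q + r) n = r ∧ PySem.Int.floordiv (n * q + r) n = q := by
  have hfd : PySem.Int.floordiv (n * q + r) n = q := by
    rw [PySem.Int.floordiv_eq_iff_of_pos (show (0:Int) < n by omega)]
    constructor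
    · nlinarith
    · nlinarith
  refine ⟨?_, hfd⟩
  have h := PySem.Int.floordiv_mul_add_mod (n * q + r) n
  rw [hfd] at h
  nlinarith

lemma charAt_zero_ne_nil (s : String) (h : charAt s 0 ≠ []) : s ≠ "" := by
  intro he; subst he; exact h rfl

lemma go_eq (ws : List String) : ∀ (n q r turn0 cnt0 : Int) (dic : PySem.Dict String Int)
    (seen : PySem.Set String) (last prev : List Char),
    1 ≤ n → 0 ≤ q → 0 ≤ r → r < n →
    (if cnt0 > n then (turn0 + 1, (1 : Int)) else (turn0, cnt0)) = (q + 1, r + 1) →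
    (∀ w, dic.contains w = true ↔ w ∈ seen) →
    ((q = 0 ∧ r = 0 ∧ last = [] ∧ ws.head? ≠ some "") ∨ (0 < n * q + r ∧ last = prev ∧ last ≠ [])) →
    solutionGo n ws dic turn0 cnt0 last = onePass n ws (n * q + r) seen prev := by
  induction ws with
  | nil => intros; simp [solutionGo, onePass]
  | cons i rest ih =>
    intro n q r turn0 cnt0 dic seen last prev hn hq hr0 hr hadj hmem hinv
    have hstep : ∃ q' r', 0 ≤ q' ∧ 0 ≤ r' ∧ r' < n ∧ n * q' + r' = n * q + r + 1 ∧
        (if r + 1 + 1 > n then (q + 1 + 1, (1 : Int)) else (q + 1, r + 1 + 1)) = (q' + 1, r' + 1) := by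
      by_cases hc : r + 1 = n
      · refine ⟨q + 1, 0, by omega, by omega, by omega, by nlinarith, ?_⟩
        rw [if_pos (by omega)]
        simp
      · refine ⟨q, r + 1, by omega, by omega, by omega, by ring, ?_⟩
        rw [if_neg (by omega)]
    obtain ⟨q', r', hq', hr0', hr', hidx', hadj'⟩ := hstep
    have hmem' : ∀ w, (dic.insert i 1).contains w = true ↔ w ∈ PySem.Set.add seen i := by
      intro w
      rw [PySem.Dict.contains_insert, PySem.Set.mem_add]
      simp only [Bool.or_eq_true, beq_iff_eq]
      rw [hmem w]
      tauto
    simp only [solutionGo, onePass, hadj]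
    rcases hinv with ⟨hq0, hrr0, hlast, hhd⟩ | ⟨hpos, hlp, hlnil⟩
    · have hi : i ≠ "" := by intro he; exact hhd (by rw [he]; rfl)
      have hlast' := charAt_last_ne_nil i hi
      have hidx0 : n * q + r = 0 := by rw [hq0, hrr0]; ring
      rw [if_pos hlast, hidx0]
      rw [if_neg (by simp)]
      rw [hidx0] at hidx'
      have := ih n q' r' (q + 1) (r + 1 + 1) (dic.insert i 1) (PySem.Set.add seen i)
        (charAt i (-1)) (charAt i (-1)) hn hq' hr0' hr' hadj' hmem'
        (Or.inr ⟨by omega, rfl, hlast'⟩)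
      rw [this, hidx']
    · rw [if_neg hlnil]
      obtain ⟨hmod, hfd⟩ := mod_fdiv_decomp n q r hn hr0 hr
      by_cases hdup : dic.contains i = true
      · rw [if_pos hdup]
        have hseen : PySem.Set.contains seen i = true := by
          rw [PySem.Set.contains_iff]; exact (hmem i).1 hdup
        rw [if_pos ⟨hpos, Or.inl hseen⟩, hmod, hfd]
      · rw [if_neg hdup]
        by_cases hch : last = charAt i 0
        · rw [if_pos hch]
          rw [if_neg (by
            rintro ⟨-, h | h⟩
            · exact hdup ((hmem i).2 ((PySem.Set.contains_iff seen i).1 h))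
            · exact h (by rw [← hch, hlp]))]
          have hi : i ≠ "" := charAt_zero_ne_nil i (by rw [← hch]; exact hlnil)
          have hlast' := charAt_last_ne_nil i hi
          have := ih n q' r' (q + 1) (r + 1 + 1) (dic.insert i 1) (PySem.Set.add seen i)
            (charAt i (-1)) (charAt i (-1)) hn hq' hr0' hr' hadj' hmem'
            (Or.inr ⟨by omega, rfl, hlast'⟩)
          rw [this, hidx']
        · rw [if_neg hch]
          rw [if_pos ⟨hpos, Or.inr (by rw [← hlp]; exact fun h => hch h.symm)⟩, hmod, hfd]

-- threaded form of pass 2, carrying the previous word's last letter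
def brkThread (prev : List Char) (ws : List String) (i total : Int) : Int :=
  match ws with
  | [] => total
  | b :: rest => if prev ≠ charAt b 0 then i else brkThread (charAt b (-1)) rest (i + 1) total

lemma brk_thread (rest : List String) : ∀ (w : String) (i total : Int),
    brkScan ((w :: rest).zip rest) i total = brkThread (charAt w (-1)) rest i total := by
  induction rest with
  | nil => intros; rfl
  | cons v rest' ih =>
    intro w i total
    simp only [List.zip_cons_cons, brkScan, brkThread]
    split_ifs with h
    · rfl
    · exact ih v (i + 1) total

lemma dup_ge (ws : List String) : ∀ (i : Int) (first : PySem.Dict String Int) (total : Int),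
    total = i + ws.length → i ≤ dupScan ws i first total := by
  induction ws with
  | nil => intro i first total ht; simp [dupScan]; omega
  | cons w rest ih =>
    intro i first total ht
    simp only [dupScan]
    split_ifs with h
    · exact le_refl i
    · have := ih (i + 1) (first.insert w i) total (by simp at ht ⊢; omega)
      omega

lemma brkT_ge (ws : List String) : ∀ (prev : List Char) (i total : Int),
    total = i + ws.length → i ≤ brkThread prev ws i total := by
  induction ws with
  | nil => intro prev i total ht; simp [brkThread]; omega
  | cons w rest ih =>
    intro prev i total ht
    simp only [brkThread]
    split_ifs with h
    · exact le_refl i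
    · have := ih (charAt w (-1)) (i + 1) total (by simp at ht ⊢; omega)
      omega

lemma onePass_eq_scans (ws : List String) : ∀ (n i total : Int)
    (seen : PySem.Set String) (first : PySem.Dict String Int) (prev : List Char),
    total = i + ws.length → 1 ≤ i →
    (∀ w, first.contains w = true ↔ PySem.Set.contains seen w = true) →
    onePass n ws i seen prev =
      (if min (dupScan ws i first total) (brkThread prev ws i total) = total then [0, 0]
       else [PySem.Int.mod (min (dupScan ws i first total) (brkThread prev ws i total)) n + 1,
             PySem.Int.floordiv (min (dupScan ws i first total) (brkThread prev ws i total)) n + 1]) := by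
  induction ws with
  | nil =>
    intro n i total seen first prev ht hi hmem
    simp [onePass, dupScan, brkThread]
  | cons w rest ih =>
    intro n i total seen first prev ht hi hmem
    have htot : total = (i + 1) + (rest.length : Int) := by simp at ht ⊢; omega
    have hlt : i < total := by simp at ht; omega
    by_cases hd : first.contains w = true
    · -- duplicate at i: dup = i, min = i
      have hs : PySem.Set.contains seen w = true := (hmem w).1 hd
      have h1 : onePass n (w :: rest) i seen prev =
          [PySem.Int.mod i n + 1, PySem.Int.floordiv i n + 1] := by
        simp only [onePass]; rw [if_pos ⟨by omega, Or.inl hs⟩]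
      have h2 : dupScan (w :: rest) i first total = i := by
        simp only [dupScan]; rw [if_pos hd]
      have hb : i ≤ brkThread prev (w :: rest) i total := by
        simp only [brkThread]
        split_ifs with h
        · exact le_refl i
        · have := brkT_ge rest (charAt w (-1)) (i + 1) total htot; omega
      rw [h1, h2, min_eq_left hb, if_neg (by omega)]
    · by_cases hc : charAt w 0 = prev
      · -- chains: recurse
        have h1 : onePass n (w :: rest) i seen prev =
            onePass n rest (i + 1) (PySem.Set.add seen w) (charAt w (-1)) := by
          simp only [onePass]
          rw [if_neg (by
            rintro ⟨-, h | h⟩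
            · exact hd ((hmem w).2 h)
            · exact h hc)]
        have h2 : dupScan (w :: rest) i first total =
            dupScan rest (i + 1) (first.insert w i) total := by
          simp only [dupScan]; rw [if_neg hd]
        have h3 : brkThread prev (w :: rest) i total =
            brkThread (charAt w (-1)) rest (i + 1) total := by
          simp only [brkThread]; rw [if_neg (fun h => h hc.symm)]
        rw [h1, h2, h3]
        exact ih n (i + 1) total (PySem.Set.add seen w) (first.insert w i) (charAt w (-1))
          htot (by omega)
          (by
            intro u
            rw [PySem.Dict.contains_insert, PySem.Set.contains_iff, PySem.Set.mem_add]
            simp only [Bool.or_eq_true, beq_iff_eq]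
            rw [hmem u, PySem.Set.contains_iff]
            tauto)
      · -- break at i: brk = i, min = i
        have h1 : onePass n (w :: rest) i seen prev =
            [PySem.Int.mod i n + 1, PySem.Int.floordiv i n + 1] := by
          simp only [onePass]; rw [if_pos ⟨by omega, Or.inr hc⟩]
        have h3 : brkThread prev (w :: rest) i total = i := by
          simp only [brkThread]; rw [if_pos (fun h => hc h.symm)]
        have hdge : i ≤ dupScan (w :: rest) i first total := by
          simp only [dupScan]
          rw [if_neg hd]
          have := dup_ge rest (i + 1) (first.insert w i) total htot
          omega
        rw [h1, h3, min_eq_right hdge, if_neg (by omega)]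


lemma dup_le (ws : List String) : ∀ (i : Int) (first : PySem.Dict String Int) (total : Int),
    total = i + ws.length → dupScan ws i first total ≤ total := by
  induction ws with
  | nil => intro i first total ht; simp [dupScan]
  | cons w rest ih =>
    intro i first total ht
    simp only [dupScan]
    split_ifs with h
    · simp at ht; omega
    · exact ih (i + 1) (first.insert w i) total (by simp at ht ⊢; omega)

lemma brkScan_lb (ps : List (String × String)) : ∀ (i total : Int),
    brkScan ps i total = total ∨ i ≤ brkScan ps i total := by
  induction ps with
  | nil => intro i total; simp [brkScan]
  | cons p rest ih =>
    intro i total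
    obtain ⟨a, b⟩ := p
    simp only [brkScan]
    split_ifs with h
    · right; exact le_refl i
    · rcases ih (i + 1) total with h' | h'
      · left; exact h'
      · right; omega

lemma brkScan_take (ps : List (String × String)) : ∀ (k : Nat) (i total : Int),
    i + ps.length ≤ total →
    brkScan (ps.take k) i total =
      if brkScan ps i total < i + k then brkScan ps i total else total := by
  induction ps with
  | nil =>
    intro k i total hit
    simp only [List.take_nil, brkScan]
    split_ifs <;> rfl
  | cons p rest ih =>
    intro k i total hit
    obtain ⟨a, b⟩ := p
    have hlen : i + 1 + (rest.length : Int) ≤ total := by simp at hit; omega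
    cases k with
    | zero =>
      simp only [List.take_zero, brkScan]
      rw [if_neg]
      push Not
      simp only [Nat.cast_zero, add_zero]
      split_ifs with h
      · exact le_refl i
      · rcases brkScan_lb rest (i + 1) total with h' | h'
        · omega
        · omega
    | succ k' =>
      simp only [List.take_succ_cons, brkScan]
      have e : i + (((k' + 1 : Nat)) : Int) = (i + 1) + (k' : Int) := by push_cast; ring
      by_cases h : charAt a (-1) ≠ charAt b 0
      · simp only [if_pos h]
        rw [if_pos (by push_cast; omega)]
      · simp only [if_neg h]
        rw [e, ih k' (i + 1) total hlen]

-- ===== VERDICT (by name: the statement is the Claim_ definition above) =====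
theorem solution_spec : Claim_unchanged_solution := by
  intro n words _ hpre
  obtain ⟨hn0, hne⟩ := hpre
  have hhd : words.head? ≠ some "" := by
    cases words with
    | nil => simp
    | cons w rest =>
      simp only [List.head?_cons]
      intro hw
      obtain ⟨i, hij, -, -⟩ := hne 0 (by simp) (by simp [hw])
      omega
  unfold Spec_solution
  intro hnD
  unfold D_solution at hnD
  push Not at hnD
  by_cases hn : 1 ≤ n
  case neg =>
    -- n < 0 and at most one word: both sides return [0, 0]
    have hneg : n < 0 := by omega
    have hlen : words.length ≤ 1 := by have := hnD hneg; omega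
    cases words with
    | nil =>
        simp [solution, solutionGo, solution_alt, dupScan, brkScan,
          PySem.List.slice, PySem.List.clampIdx]
    | cons w rest =>
      have hrest : rest = [] := by
        cases rest with
        | nil => rfl
        | cons v t => simp at hlen
      subst hrest
      have hA : solution n [w] = [0, 0] := by
        simp [solution, solutionGo]
      have hB : solution_alt n [w] = [0, 0] := by
        simp [solution_alt, dupScan, brkScan, PySem.Dict.contains_empty,
          PySem.List.slice, PySem.List.clampIdx]
      rw [hA, hB]
  case pos =>
  unfold solution
  have hgo := go_eq words n 0 0 1 1 PySem.Dict.empty PySem.Set.empty [] [] hn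
    le_rfl le_rfl (by omega) (by rw [if_neg (by omega)]; norm_num)
    (by simp [PySem.Dict.contains_empty, PySem.Set.empty])
    (Or.inl ⟨rfl, rfl, rfl, hhd⟩)
  rw [show n * 0 + 0 = (0 : Int) by ring] at hgo
  rw [hgo]
  cases words with
  | nil =>
    simp [onePass, solution_alt, dupScan, brkScan, PySem.List.slice, PySem.List.clampIdx]
  | cons w rest =>
    have hempty : (PySem.Dict.empty : PySem.Dict String Int).contains w = false := by
      simp [PySem.Dict.contains_empty]
    have h1 : onePass n (w :: rest) 0 PySem.Set.empty [] =
        onePass n rest 1 (PySem.Set.add PySem.Set.empty w) (charAt w (-1)) := by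
      simp only [onePass]; rw [if_neg (by rintro ⟨h, -⟩; omega)]; norm_num
    have h2 : dupScan (w :: rest) 0 PySem.Dict.empty (((w :: rest).length : Nat) : Int) =
        dupScan rest 1 (PySem.Dict.empty.insert w 0) (((w :: rest).length : Nat) : Int) := by
      simp only [dupScan]; rw [if_neg (by simp [hempty])]; norm_num
    have h3 := brk_thread rest w 1 (((w :: rest).length : Nat) : Int)
    have hm := onePass_eq_scans rest n 1 (((w :: rest).length : Nat) : Int)
      (PySem.Set.add PySem.Set.empty w) (PySem.Dict.empty.insert w 0) (charAt w (-1))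
      (by simp; omega) le_rfl
      (by
        intro u
        rw [PySem.Dict.contains_insert, PySem.Set.contains_iff, PySem.Set.mem_add]
        simp [PySem.Dict.contains_empty, PySem.Set.empty])
    -- bridge the capped scan of solution_alt to the full threaded scan of hm
    have h0dup : (0 : Int) ≤ dupScan (w :: rest) 0 PySem.Dict.empty (((w :: rest).length : Nat) : Int) :=
      dup_ge (w :: rest) 0 PySem.Dict.empty _ (by simp)
    have hledup : dupScan (w :: rest) 0 PySem.Dict.empty (((w :: rest).length : Nat) : Int) ≤ (((w :: rest).length : Nat) : Int) :=
      dup_le (w :: rest) 0 PySem.Dict.empty _ (by simp)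
    set dup := dupScan (w :: rest) 0 PySem.Dict.empty (((w :: rest).length : Nat) : Int) with hdupdef
    set total := (((w :: rest).length : Nat) : Int) with htotdef
    have hs1 : PySem.List.slice (w :: rest) (some 0) (some dup) = (w :: rest).take dup.toNat := by
      rw [PySem.List.slice_zero_start, PySem.List.slice_to _ h0dup]
    have hs2 : PySem.List.slice (w :: rest) (some 1) (some (dup + 1)) = rest.take dup.toNat := by
      rw [PySem.List.slice_toNat _ (by norm_num) (by omega)]
      simp only [List.drop_succ_cons, List.drop_zero, Int.toNat_one]
      congr 1
      omega
    have hzip : ((w :: rest).take dup.toNat).zip (rest.take dup.toNat) =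
        ((w :: rest).zip rest).take dup.toNat := by
      simp [List.zip_eq_zipWith, List.take_zipWith]
    have htot1 : (1 : Int) ≤ total := by simp [htotdef]
    have hcap : brkScan ((((w :: rest).zip rest).take dup.toNat)) 1 total =
        if brkScan ((w :: rest).zip rest) 1 total < 1 + (dup.toNat : Int) then
          brkScan ((w :: rest).zip rest) 1 total
        else total :=
      brkScan_take ((w :: rest).zip rest) dup.toNat 1 total (by simp [htotdef]; omega)
    have hmin : min dup (brkScan ((PySem.List.slice (w :: rest) (some 0) (some dup)).zip
            (PySem.List.slice (w :: rest) (some 1) (some (dup + 1)))) 1 total) =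
        min dup (brkScan ((w :: rest).zip rest) 1 total) := by
      rw [hs1, hs2, hzip, hcap]
      have htn : (dup.toNat : Int) = dup := Int.toNat_of_nonneg h0dup
      rcases brkScan_lb ((w :: rest).zip rest) 1 total with hb | hb
      · split_ifs with h <;> omega
      · split_ifs with h <;> omega
    simp only [solution_alt]
    rw [← hdupdef, hmin, h1, hm, ← h2, ← h3]

theorem solution_changed : Claim_changed_solution := by
  unfold Claim_changed_solution
  decide
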